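-- pv_equiv track=rewrite | github.com/dotunpeters/python-recap | python_recap/get_min_days.py | get_minimum_days
-- ===== SOURCE A (Python) =====
-- from typing import List
--
-- def get_minimum_days(parcels: List[int]) -> int:
--     # Write your code here
--     counter = 0
--     for _ in parcels:
--         parcels = [x for x in parcels if x != 0]
--         if len(parcels) == 0:
--             break
--         if len(parcels) >= 1:
--             counter += 1
--         parcels = [x - min(parcels) for x in parcels]
--     return counter
-- ===== SOURCE B (Python) =====
-- def get_minimum_days(parcels):
--     vals = sorted(v for v in parcels if v != 0)
--     count = 0
--     prev = None
--     for v in vals: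
--         if prev is None or v != prev:
--             count += 1
--         prev = v
--     return count
-- ===== Notes on version B (the rewrite author's own statement) =====
-- stated objective: faster
-- what changed: Replaces A's repeated filter-zeros/subtract-min rounds (one full rescan per distinct value) with a single sort of the nonzero values followed by one linear pass counting positions where the value changes.
import Mathlib
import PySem

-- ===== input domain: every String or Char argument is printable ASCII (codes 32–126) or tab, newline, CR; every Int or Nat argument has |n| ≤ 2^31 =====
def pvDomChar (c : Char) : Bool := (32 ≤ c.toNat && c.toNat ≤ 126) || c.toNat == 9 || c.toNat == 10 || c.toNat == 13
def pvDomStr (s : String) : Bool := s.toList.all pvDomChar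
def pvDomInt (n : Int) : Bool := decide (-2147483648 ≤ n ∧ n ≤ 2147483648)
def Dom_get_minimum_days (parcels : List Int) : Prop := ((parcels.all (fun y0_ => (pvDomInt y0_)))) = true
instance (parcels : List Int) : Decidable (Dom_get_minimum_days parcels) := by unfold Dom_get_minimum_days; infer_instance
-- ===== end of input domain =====

-- B replaces A's repeated filter-zeros/subtract-min rescans by one sort of the
-- nonzero values and a single pass counting value changes (asymptotically faster).


-- ===== PORT A =====
-- the for-loop of A: first arg is the iterator ('for _ in parcels'), second the
-- rebound 'parcels' variable, third 'counter'; 'break' returns the counter.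
def get_minimum_days_loop : List Int → List Int → Int → Int
  | [], _, counter => counter
  | _ :: rest, parcels, counter =>
    let parcels1 := parcels.filter (fun x => x != 0)
    if parcels1.length = 0 then counter
    else
      let counter1 := if parcels1.length ≥ 1 then counter + 1 else counter
      -- min(parcels): parcels1 is nonempty on this branch, so min? is some; getD 0 is exact
      let m := (PySem.List.min? parcels1 (fun x => x)).getD 0
      get_minimum_days_loop rest (parcels1.map (fun x => x - m)) counter1

def get_minimum_days (parcels : List Int) : Int :=
  get_minimum_days_loop parcels parcels 0

-- ===== PORT B =====
-- the for-loop of B: state is (prev, count)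
def get_minimum_days_alt_loop : List Int → Option Int → Int → Int
  | [], _, count => count
  | v :: rest, prev, count =>
    get_minimum_days_alt_loop rest (some v)
      (if prev = none ∨ prev ≠ some v then count + 1 else count)

def get_minimum_days_alt (parcels : List Int) : Int :=
  let vals := PySem.List.sorted (parcels.filter (fun x => x != 0)) (fun x => x) false
  get_minimum_days_alt_loop vals none 0

-- ===== PRECONDITION & SPEC =====
def Spec_get_minimum_days (parcels : List Int) (out : Int) : Prop := out = get_minimum_days_alt parcels
instance (parcels : List Int) (out : Int) : Decidable (Spec_get_minimum_days parcels out) := by unfold Spec_get_minimum_days; infer_instance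

-- ===== CLAIM (what is proved, stated in full; the proofs are below) =====
def Claim_equal_get_minimum_days : Prop := ∀ (parcels : List Int), Dom_get_minimum_days parcels → Spec_get_minimum_days parcels (get_minimum_days parcels)

-- ===== LEMMAS AND PROOFS =====

theorem toFinset_map_int (l : List Int) (f : Int → Int) :
    (l.map f).toFinset = l.toFinset.image f := by
  ext y; simp

-- A's loop computes: counter + number of distinct nonzero values of the current list,
-- provided the remaining iterations suffice (they always do).
theorem loopA_eq (rest : List Int) : ∀ (cur : List Int) (c : Int),
    (cur.filter (fun x => x != 0)).toFinset.card ≤ rest.length →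
    get_minimum_days_loop rest cur c
      = c + ((cur.filter (fun x => x != 0)).toFinset.card : Int) := by
  induction rest with
  | nil =>
    intro cur c h
    simp only [List.length_nil, Nat.le_zero] at h
    show c = c + ((cur.filter (fun x => x != 0)).toFinset.card : Int)
    rw [h]
    simp
  | cons r rest ih =>
    intro cur c h
    by_cases hlen : (cur.filter (fun x => x != 0)).length = 0
    · have hnil : cur.filter (fun x => x != 0) = [] := List.length_eq_zero_iff.mp hlen
      simp [get_minimum_days_loop, hnil]
    · set cur1 := cur.filter (fun x => x != 0) with hcur1
      have hne : cur1 ≠ [] := fun hn => hlen (by simp [hn])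
      -- the min exists and is a member / lower bound
      obtain ⟨m, hm⟩ : ∃ m, PySem.List.min? cur1 (fun x => x) = some m := by
        cases hmin : PySem.List.min? cur1 (fun x => x) with
        | none => exact absurd ((PySem.List.min?_eq_none_iff _ _).mp hmin) hne
        | some m => exact ⟨m, rfl⟩
      have hmem : m ∈ cur1 := PySem.List.min?_mem hm
      -- unfold one step of the loop
      have hstep : get_minimum_days_loop (r :: rest) cur c
          = get_minimum_days_loop rest (cur1.map (fun x => x - m)) (c + 1) := by
        simp [get_minimum_days_loop, ← hcur1, hlen, Nat.one_le_iff_ne_zero.mpr hlen, hm]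
      -- nonzero residues after subtracting the min = the non-minimal elements, shifted
      have hres : (cur1.map (fun x => x - m)).filter (fun x => x != 0)
          = (cur1.filter (fun x => x != m)).map (fun x => x - m) := by
        rw [List.filter_map]
        apply congrArg (List.map _)
        apply List.filter_congr
        intro x _
        rw [Bool.eq_iff_iff]
        simp [Function.comp, sub_ne_zero]
      have hfilt : ((cur1.map (fun x => x - m)).filter (fun x => x != 0)).toFinset.card
          = cur1.toFinset.card - 1 := by
        rw [hres, toFinset_map_int, Finset.card_image_of_injective _ (sub_left_injective),
          List.toFinset_filter]
        have herase : cur1.toFinset.filter (fun x => x != m) = cur1.toFinset.erase m := by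
          ext y; simp [Finset.mem_erase, and_comm]
        rw [herase, Finset.card_erase_of_mem (List.mem_toFinset.mpr hmem)]
      have hcard1 : 1 ≤ cur1.toFinset.card :=
        Finset.card_pos.mpr ⟨m, List.mem_toFinset.mpr hmem⟩
      have hle : ((cur1.map (fun x => x - m)).filter (fun x => x != 0)).toFinset.card
          ≤ rest.length := by
        rw [hfilt]
        simp only [List.length_cons] at h
        omega
      rw [hstep, ih _ _ hle, hfilt]
      omega

-- B's loop on a sorted list with a lower-bound prev counts the distinct values
-- other than the one equal to prev (if any).
theorem loopB_some (ys : List Int) : ∀ (p c : Int),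
    ys.Pairwise (· ≤ ·) → (∀ y ∈ ys, p ≤ y) →
    get_minimum_days_alt_loop ys (some p) c = c + ((ys.toFinset.erase p).card : Int) := by
  induction ys with
  | nil => intro p c _ _; simp [get_minimum_days_alt_loop]
  | cons v rest ih =>
    intro p c hs hp
    have hsrest : rest.Pairwise (· ≤ ·) := (List.pairwise_cons.mp hs).2
    have hvle : ∀ y ∈ rest, v ≤ y := (List.pairwise_cons.mp hs).1
    have hpv : p ≤ v := hp v (by simp)
    by_cases hpe : p = v
    · have hcond : get_minimum_days_alt_loop (v :: rest) (some p) c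
          = get_minimum_days_alt_loop rest (some v) c := by
        simp [get_minimum_days_alt_loop, hpe]
      rw [hcond, ih v c hsrest hvle, hpe]
      rw [List.toFinset_cons, Finset.erase_insert_eq_erase]
    · have hcond : get_minimum_days_alt_loop (v :: rest) (some p) c
          = get_minimum_days_alt_loop rest (some v) (c + 1) := by
        simp [get_minimum_days_alt_loop, hpe]
      have hpnot : p ∉ insert v rest.toFinset := by
        simp only [Finset.mem_insert, List.mem_toFinset]
        push Not
        exact ⟨hpe, fun hmem => absurd (hvle p hmem) (by omega : ¬ v ≤ p)⟩
      have hins : insert v rest.toFinset = insert v (rest.toFinset.erase v) := by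
        ext y; by_cases hy : y = v <;> simp [hy]
      rw [hcond, ih v (c + 1) hsrest hvle, List.toFinset_cons,
        Finset.erase_eq_of_notMem hpnot, hins,
        Finset.card_insert_of_notMem (Finset.notMem_erase _ _)]
      push_cast; ring

theorem loopB_none (ys : List Int) (c : Int) (hs : ys.Pairwise (· ≤ ·)) :
    get_minimum_days_alt_loop ys none c = c + (ys.toFinset.card : Int) := by
  cases ys with
  | nil => simp [get_minimum_days_alt_loop]
  | cons v rest =>
    have hsrest : rest.Pairwise (· ≤ ·) := (List.pairwise_cons.mp hs).2
    have hvle : ∀ y ∈ rest, v ≤ y := (List.pairwise_cons.mp hs).1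
    have hcond : get_minimum_days_alt_loop (v :: rest) none c
        = get_minimum_days_alt_loop rest (some v) (c + 1) := by
      simp [get_minimum_days_alt_loop]
    have hins : insert v rest.toFinset = insert v (rest.toFinset.erase v) := by
      ext y; by_cases hy : y = v <;> simp [hy]
    rw [hcond, loopB_some rest v (c + 1) hsrest hvle, List.toFinset_cons, hins,
      Finset.card_insert_of_notMem (Finset.notMem_erase _ _)]
    push_cast; ring

-- ===== VERDICT (by name: the statement is the Claim_ definition above) =====
theorem get_minimum_days_spec : Claim_equal_get_minimum_days := by
  intro parcels _
  unfold Spec_get_minimum_days get_minimum_days get_minimum_days_alt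
  set xs := parcels.filter (fun x => x != 0) with hxs
  set vals := PySem.List.sorted xs (fun x => x) false with hvals
  have hperm : vals.Perm xs := PySem.List.sorted_perm ..
  have hA : get_minimum_days_loop parcels parcels 0 = 0 + (xs.toFinset.card : Int) := by
    apply loopA_eq
    calc xs.toFinset.card ≤ xs.length := xs.toFinset_card_le
      _ ≤ parcels.length := List.length_filter_le _ _
  have hB : get_minimum_days_alt_loop vals none 0 = 0 + (vals.toFinset.card : Int) :=
    loopB_none vals 0 (PySem.List.sorted_pairwise ..)
  rw [hA, hB, List.toFinset_eq_of_perm _ _ hperm]
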